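-- pv_equiv track=rewrite | github.com/Krandheer/data-structure | leetcode_contest.py | find_minimumTime
-- ===== SOURCE A (Python) =====
-- from collections import defaultdict
-- from typing import List
--
-- def find_minimumTime(strength: List[int], K: int) -> int:
--     x = 1
--     energy = 0
--     time = 0
--     n = len(strength)
--     strength.sort()
--     i = 0
--     temp = defaultdict(int)
--     for ele in strength:
--         temp[ele] += 1
--     while n > 0:
--         time += 1
--         energy = energy + x
--
--         if energy >= strength[i]:
--             n = n - 1
--             energy = 0
--             x = x + K
--             temp[strength[i]] -= 1
--             i += 1
--         elif energy in temp and temp[energy] > 0: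
--             n = n - 1
--             x = x + K
--             temp[energy] -= 1
--             energy = 0
--             i += 1
--
--     return time
-- ===== SOURCE B (Python) =====
-- from typing import List
--
-- def find_minimumTime(strength: List[int], K: int) -> int:
--     # Sorts strength in place (same observable mutation as the original).
--     strength.sort()
--     time = 0
--     x = 1
--     for s in strength:
--         time += 1 if s <= x else -(-s // x)
--         x += K
--     return time
-- ===== Notes on version B (the rewrite author's own statement) =====
-- stated objective: faster
-- what changed: Replaces the unit-step energy simulation (one loop iteration per time unit, plus a defaultdict of strengths) with a single pass over the sorted list adding max(1, ceil(strength[i]/x)) per lock in closed form.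
import Mathlib
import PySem

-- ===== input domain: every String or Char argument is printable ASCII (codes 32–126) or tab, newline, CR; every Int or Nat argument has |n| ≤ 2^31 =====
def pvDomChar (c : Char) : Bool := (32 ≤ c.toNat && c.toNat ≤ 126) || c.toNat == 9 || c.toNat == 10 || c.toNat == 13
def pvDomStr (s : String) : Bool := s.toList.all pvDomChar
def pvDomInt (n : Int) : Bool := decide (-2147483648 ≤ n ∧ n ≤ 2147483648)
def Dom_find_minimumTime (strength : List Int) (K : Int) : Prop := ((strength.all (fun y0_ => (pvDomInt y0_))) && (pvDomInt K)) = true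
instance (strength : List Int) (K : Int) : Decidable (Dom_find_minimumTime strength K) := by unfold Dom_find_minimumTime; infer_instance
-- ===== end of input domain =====

-- B replaces A's unit-step energy simulation (one loop iteration per time unit plus a
-- defaultdict of strengths) with one closed-form ceil-division pass over the sorted list;
-- both Pythons sort the list argument in place — the equivalence proved is about the return value.


-- ===== PORT A =====
-- fuel for the while loop: an upper bound on its iteration count, sufficient on every
-- input Pre_ admits (proved below); the loop body is a literal transliteration.
def pvFuelA (L : List Int) : Nat := (L.map (fun s => s.natAbs + 1)).sum

def pvLoopA (L : List Int) (K : Int) : Nat → Int → Int → Int → Int → Int → PySem.Dict Int Int → Int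
  | 0, _, _, time, _, _, _ => time
  | fuel+1, x, energy, time, n, i, temp =>
    if n > 0 then
      let time := time + 1
      let energy := energy + x
      -- strength[i]: always in range on the inputs Pre_ admits
      let s := (PySem.List.pyGet? L i).getD 0
      if energy ≥ s then
        pvLoopA L K fuel (x + K) 0 time (n - 1) (i + 1) (temp.modify s 0 (· - 1))
      else if temp.contains energy && decide (0 < temp.getD energy 0) then
        pvLoopA L K fuel (x + K) 0 time (n - 1) (i + 1) (temp.modify energy 0 (· - 1))
      else
        pvLoopA L K fuel x energy time n i temp
    else time

def find_minimumTime (strength : List Int) (K : Int) : Int :=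
  let L := PySem.List.sorted strength (fun s => s) false
  let temp := L.foldl (fun d ele => d.modify ele 0 (· + 1)) PySem.Dict.empty
  pvLoopA L K (pvFuelA L) 1 0 0 (L.length : Int) 0 temp

-- ===== PORT B =====
-- the body of B's for loop: (time, x) ↦ (time + (1 if s ≤ x else ceil(s/x)), x + K)
def pvStep (K : Int) (acc : Int × Int) (s : Int) : Int × Int :=
  (acc.1 + (if s ≤ acc.2 then 1 else -(PySem.Int.floordiv (-s) acc.2)), acc.2 + K)

def find_minimumTime_alt (strength : List Int) (K : Int) : Int :=
  let L := PySem.List.sorted strength (fun s => s) false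
  (L.foldl (pvStep K) (0, 1)).1

-- ===== PRECONDITION & SPEC =====
-- Pre_ excludes exactly the inputs on which A's while loop never terminates: some lock
-- whose per-lock energy gain 1 + j*K (K negative) is non-positive and below its strength.
def Pre_find_minimumTime (strength : List Int) (K : Int) : Prop :=
  ∀ j : Nat, j < strength.length →
    0 < 1 + (j : Int) * K ∨
      (PySem.List.sorted strength (fun s => s) false).getD j 0 ≤ 1 + (j : Int) * K

instance (strength : List Int) (K : Int) : Decidable (Pre_find_minimumTime strength K) := by
  unfold Pre_find_minimumTime; infer_instance

def pvWitness_find_minimumTime : List Int × Int := ([7, 3, 5], 2)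

def Spec_find_minimumTime (strength : List Int) (K : Int) (out : Int) : Prop := out = find_minimumTime_alt strength K
instance (strength : List Int) (K : Int) (out : Int) : Decidable (Spec_find_minimumTime strength K out) := by unfold Spec_find_minimumTime; infer_instance

-- ===== CLAIM (what is proved, stated in full; the proofs are below) =====
def Claim_equal_find_minimumTime : Prop := ∀ (strength : List Int) (K : Int), Dom_find_minimumTime strength K → Pre_find_minimumTime strength K → Spec_find_minimumTime strength K (find_minimumTime strength K)

-- ===== LEMMAS AND PROOFS =====

-- Breaking one lock of strength s = L[i]: when k is a positive iteration count with
-- energy + k*x ≥ s and every earlier count stays below s, A's loop runs exactly k times;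
-- the defaultdict branch never fires because every positively-counted key is ≥ s.
theorem pvLoopA_lock (L : List Int) (Kv : Int) :
    ∀ (k fuel : Nat) (x energy time : Int) (i : Nat) (temp : PySem.Dict Int Int) (s : Int),
      (PySem.List.pyGet? L (i : Int)).getD 0 = s →
      (0 : Int) < (L.length : Int) - (i : Int) →
      1 ≤ k →
      s ≤ energy + (k : Int) * x →
      (∀ j : Nat, 1 ≤ j → j < k → energy + (j : Int) * x < s) →
      (∀ e, e < s → temp.getD e 0 ≤ 0) →
      pvLoopA L Kv (fuel + k) x energy time ((L.length : Int) - (i : Int)) (i : Int) temp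
        = pvLoopA L Kv fuel (x + Kv) 0 (time + (k : Int)) ((L.length : Int) - ((i : Int) + 1)) ((i : Int) + 1) (temp.modify s 0 (· - 1)) := by
  intro k
  induction k with
  | zero =>
    intro fuel x energy time i temp s _ _ hk
    exact absurd hk (by omega)
  | succ k' ih =>
    intro fuel x energy time i temp s hget hn _ hk1 hk2 hlow
    rw [show fuel + (k' + 1) = (fuel + k') + 1 by omega]
    simp only [pvLoopA]
    rw [if_pos hn, hget]
    by_cases hk0 : k' = 0
    · subst hk0
      have hsx : s ≤ energy + x := by push_cast at hk1; linarith
      rw [if_pos hsx]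
      push_cast
      ring_nf
    · have hxlt : energy + x < s := by
        have := hk2 1 (by omega) (by omega)
        push_cast at this; linarith
      rw [if_neg (by omega : ¬ energy + x ≥ s)]
      have h0 : ¬ 0 < temp.getD (energy + x) 0 := by
        have := hlow (energy + x) hxlt; omega
      rw [if_neg (by simp [h0])]
      rw [ih fuel x (energy + x) (time + 1) i temp s hget hn (by omega)
            (by push_cast at hk1 ⊢; linarith)
            (by intro j hj1 hj2
                have := hk2 (j + 1) (by omega) (by omega)
                push_cast at this ⊢; linarith)
            hlow]
      push_cast
      ring_nf

-- A's loop over the remaining suffix of the sorted list equals B's fold over that suffix.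
theorem pvLoopA_eq_fold (K : Int) :
    ∀ (rest : List Int) (L : List Int) (i : Nat) (x time : Int) (temp : PySem.Dict Int Int) (fuel : Nat),
      L.Pairwise (· ≤ ·) →
      L.drop i = rest →
      (∀ j : Nat, j < rest.length → 0 < x + (j : Int) * K ∨ rest.getD j 0 ≤ x + (j : Int) * K) →
      (∀ v, temp.getD v 0 = (rest.count v : Int)) →
      (rest.map (fun s => s.natAbs + 1)).sum ≤ fuel →
      pvLoopA L K fuel x 0 time ((L.length : Int) - (i : Int)) (i : Int) temp
        = (rest.foldl (pvStep K) (time, x)).1 := by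
  intro rest
  induction rest with
  | nil =>
    intro L i x time temp fuel _ hdrop _ _ _
    have hlen : L.length ≤ i := List.drop_eq_nil_iff.mp hdrop
    have hn : ¬ ((L.length : Int) - (i : Int) > 0) := by omega
    cases fuel with
    | zero => simp [pvLoopA]
    | succ m => simp only [pvLoopA, List.foldl_nil]; rw [if_neg hn]
  | cons s rest' ih =>
    intro L i x time temp fuel hsort hdrop hpre htemp hfuel
    have hi : i < L.length := by
      by_contra h
      rw [List.drop_eq_nil_iff.mpr (by omega)] at hdrop
      exact (List.cons_ne_nil _ _) hdrop.symm
    have hgetq : L[i]? = some s := by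
      have h := congrArg (fun t => t[0]?) hdrop
      simpa using h
    have hget : (PySem.List.pyGet? L (i : Int)).getD 0 = s := by
      rw [PySem.List.pyGet?_natCast, hgetq]; rfl
    have hsorted' : (s :: rest').Pairwise (· ≤ ·) := by
      rw [← hdrop]; exact hsort.sublist (List.drop_sublist _ _)
    have hmem : ∀ y ∈ rest', s ≤ y := (List.pairwise_cons.mp hsorted').1
    have hn : (0 : Int) < (L.length : Int) - (i : Int) := by omega
    have hlow : ∀ e, e < s → temp.getD e 0 ≤ 0 := by
      intro e he
      rw [htemp e]
      have hc : (s :: rest').count e = 0 := by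
        rw [List.count_eq_zero]
        intro hmem'
        rcases List.mem_cons.mp hmem' with h | h
        · omega
        · exact absurd (hmem e h) (by omega)
      simp [hc]
    have hdrop' : L.drop (i + 1) = rest' := by
      have h1 : L.drop (i + 1) = (L.drop i).drop 1 := by
        rw [List.drop_drop]
      rw [h1, hdrop]; rfl
    have hpre' : ∀ j : Nat, j < rest'.length →
        0 < (x + K) + (j : Int) * K ∨ rest'.getD j 0 ≤ (x + K) + (j : Int) * K := by
      intro j hj
      have h := hpre (j + 1) (by simpa using Nat.succ_lt_succ hj)
      rcases h with h | h
      · left; push_cast at h ⊢; linarith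
      · right; rw [List.getD_cons_succ] at h; push_cast at h ⊢; linarith
    have htemp' : ∀ v, (temp.modify s 0 (· - 1)).getD v 0 = (rest'.count v : Int) := by
      intro v
      rw [PySem.Dict.getD_modify]
      by_cases hv : v = s
      · rw [if_pos hv, htemp, hv, List.count_cons_self]; push_cast; ring
      · rw [if_neg hv, htemp]
        have : (s :: rest').count v = rest'.count v := by
          simp only [List.count_cons, beq_iff_eq]
          rw [if_neg (fun h : s = v => hv h.symm), add_zero]
        rw [this]
    have hfuel' : (s.natAbs + 1) + (rest'.map (fun s => s.natAbs + 1)).sum ≤ fuel := by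
      simpa using hfuel
    have hx0 : 0 < x ∨ s ≤ x := by
      have h := hpre 0 (by simp)
      simpa using h
    have hcastfix : ((i : Int) + 1) = (((i + 1 : Nat) : Int)) := by push_cast; ring
    by_cases hsx : s ≤ x
    · -- one iteration breaks the lock
      rw [show fuel = (fuel - 1) + 1 by omega]
      rw [pvLoopA_lock L K 1 (fuel - 1) x 0 time i temp s hget hn (le_refl 1)
            (by push_cast; linarith)
            (by intro j hj1 hj2; exact absurd hj2 (by omega))
            hlow]
      rw [hcastfix]
      rw [List.foldl_cons,
          show pvStep K (time, x) s = (time + ((1 : Nat) : Int), x + K) by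
            simp [pvStep, hsx]]
      exact ih L (i + 1) (x + K) (time + ((1 : Nat) : Int)) _ (fuel - 1)
        hsort hdrop' hpre' htemp' (by omega)
    · -- ceil(s/x) iterations break the lock
      have hxpos : 0 < x := by
        rcases hx0 with h | h
        · exact h
        · exact absurd h hsx
      set kI := -(PySem.Int.floordiv (-s) x) with hkI
      obtain ⟨hlt, hle⟩ := (PySem.Int.neg_floordiv_neg_eq_iff_of_pos hxpos).mp hkI.symm
      have hk2 : 2 ≤ kI := by
        by_contra h
        have h1 : kI * x ≤ 1 * x := mul_le_mul_of_nonneg_right (by omega) (le_of_lt hxpos)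
        rw [one_mul] at h1
        linarith
      set kN := kI.toNat with hkN
      have hcast : (kN : Int) = kI := Int.toNat_of_nonneg (by omega)
      have hkle : kI ≤ s := by
        have h1x : (1 : Int) ≤ x := hxpos
        have h2 : kI - 1 ≤ (kI - 1) * x := le_mul_of_one_le_right (by omega) h1x
        linarith
      have hspos : (0 : Int) < s := by linarith
      have hkn : kN ≤ s.natAbs := by rw [hkN]; omega
      rw [show fuel = (fuel - kN) + kN by omega]
      rw [pvLoopA_lock L K kN (fuel - kN) x 0 time i temp s hget hn (by omega)
            (by rw [hcast]; linarith)
            (by intro j hj1 hj2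
                have hj : (j : Int) ≤ kI - 1 := by omega
                have h2 : (j : Int) * x ≤ (kI - 1) * x :=
                  mul_le_mul_of_nonneg_right hj (le_of_lt hxpos)
                linarith)
            hlow]
      rw [hcastfix]
      rw [List.foldl_cons,
          show pvStep K (time, x) s = (time + (kN : Int), x + K) by
            simp only [pvStep]; rw [if_neg hsx, hcast, hkI]]
      exact ih L (i + 1) (x + K) (time + (kN : Int)) _ (fuel - kN)
        hsort hdrop' hpre' htemp' (by omega)

-- ===== VERDICT (by name: the statement is the Claim_ definition above) =====
theorem find_minimumTime_spec : Claim_equal_find_minimumTime := by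
  intro strength K _ hpre
  show find_minimumTime strength K = find_minimumTime_alt strength K
  simp only [find_minimumTime, find_minimumTime_alt]
  set L := PySem.List.sorted strength (fun s => s) false with hL
  have hlen : L.length = strength.length := by
    rw [hL]; exact PySem.List.length_sorted _ _ _
  have hsort : L.Pairwise (· ≤ ·) := by
    rw [hL]; exact PySem.List.sorted_pairwise strength (fun s => s)
  have h := pvLoopA_eq_fold K L L 0 1 0
      (L.foldl (fun d ele => d.modify ele 0 (· + 1)) PySem.Dict.empty) (pvFuelA L)
      hsort (by simp)
      (by intro j hj
          have := hpre j (by omega)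
          rw [← hL] at this
          exact this)
      (by intro v
          rw [PySem.Dict.getD_foldl_modify_add_one]
          simp [pysem])
      (by simp [pvFuelA])
  simpa using h
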